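-- pv_equiv track=rewrite | github.com/artbohr/Codewars-Algorithms-Python- | 6-kyu/fruit-machine.py | fruit
-- ===== SOURCE A (Python) =====
-- def fruit(reels, spins):
--     scoring_table = {"Wild": 10,"Star": 9,"Bell": 8,"Shell": 7,
--     "Seven":6,"Cherry":5,"Bar":4,"King":3,"Queen":2,"Jack":1}
--
--     result = [reel[spins[i]] for i, reel in enumerate(reels)]
--     counted = False
--     output = 0
--     bonus = 1
--
--     for x in result:
--         if result.count(x) == 3:
--             return scoring_table[x] * 10
--         if result.count(x) == 2 and not counted:
--             output = scoring_table[x]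
--             counted = True
--         if x == 'Wild' and result.count('Wild') == 1:
--             bonus = 2
--
--     return output * bonus
-- ===== SOURCE B (Python) =====
-- def fruit(reels, spins):
--     scoring_table = {"Wild": 10, "Star": 9, "Bell": 8, "Shell": 7,
--                      "Seven": 6, "Cherry": 5, "Bar": 4, "King": 3, "Queen": 2, "Jack": 1}
--
--     result = [reel[spin] for reel, spin in zip(reels, spins)]
--     counts = {}
--     for x in result:
--         counts[x] = counts.get(x, 0) + 1
--
--     triple = next((x for x in result if counts[x] == 3), None)
--     if triple is not None:
--         return scoring_table[triple] * 10
--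
--     pair = next((x for x in result if counts[x] == 2), None)
--     output = scoring_table[pair] if pair is not None else 0
--     bonus = 2 if counts.get("Wild") == 1 else 1
--     return output * bonus
-- ===== Notes on version B (the rewrite author's own statement) =====
-- stated objective: alternative
-- what changed: Replaces A's scan over the spun symbols with repeated result.count calls and counted/output/bonus flag accumulators by a one-pass count dictionary followed by first-match searches for a count-3 and a count-2 symbol, with the Wild bonus read off the dictionary.
import Mathlib
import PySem

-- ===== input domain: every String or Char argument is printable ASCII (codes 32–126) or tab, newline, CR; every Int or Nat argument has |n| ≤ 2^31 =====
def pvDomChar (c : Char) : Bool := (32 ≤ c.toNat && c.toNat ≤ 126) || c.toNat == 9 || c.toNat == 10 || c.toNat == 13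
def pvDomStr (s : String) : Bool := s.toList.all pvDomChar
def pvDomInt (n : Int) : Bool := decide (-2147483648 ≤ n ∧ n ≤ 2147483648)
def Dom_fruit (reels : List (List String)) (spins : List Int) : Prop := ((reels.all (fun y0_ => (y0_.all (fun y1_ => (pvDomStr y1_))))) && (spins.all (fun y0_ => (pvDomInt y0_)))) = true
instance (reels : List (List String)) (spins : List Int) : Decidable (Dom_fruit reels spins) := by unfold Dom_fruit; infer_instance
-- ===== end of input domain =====

-- ===== PORT A =====
-- B scores via a symbol counter and first-match searches instead of A's element scan
-- with count flags and accumulators (objective: alternative decomposition, same cost).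
def fruitTable : PySem.Dict String Int :=
  PySem.Dict.ofList [("Wild", 10), ("Star", 9), ("Bell", 8), ("Shell", 7),
    ("Seven", 6), ("Cherry", 5), ("Bar", 4), ("King", 3), ("Queen", 2), ("Jack", 1)]

-- A's for-loop over result, carrying (counted, output, bonus); scoring_table[x] is
-- getD 0 (Pre_fruit excludes the KeyError inputs).
def fruitLoop (result : List String) : List String → Bool → Int → Int → Int
  | [], _, output, bonus => output * bonus
  | x :: xs, counted, output, bonus =>
    if List.count x result = 3 then fruitTable.getD x 0 * 10
    else
      let co := if List.count x result = 2 ∧ counted = false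
                then (true, fruitTable.getD x 0) else (counted, output)
      let bonus := if x = "Wild" ∧ List.count "Wild" result = 1 then 2 else bonus
      fruitLoop result xs co.1 co.2 bonus

def fruit (reels : List (List String)) (spins : List Int) : Int :=
  -- reel[spins[i]]: the getD defaults stand for the IndexError cases, excluded by Pre_fruit
  let result := (PySem.List.enumerate reels).map
    (fun p => (PySem.List.pyGet? p.2 (PySem.List.pyGetD spins p.1 0)).getD "")
  fruitLoop result result false 0 1

-- ===== PORT B =====
def fruitAltTable : PySem.Dict String Int :=
  PySem.Dict.ofList [("Wild", 10), ("Star", 9), ("Bell", 8), ("Shell", 7),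
    ("Seven", 6), ("Cherry", 5), ("Bar", 4), ("King", 3), ("Queen", 2), ("Jack", 1)]

def fruit_alt (reels : List (List String)) (spins : List Int) : Int :=
  let result := (reels.zip spins).map (fun p => (PySem.List.pyGet? p.1 p.2).getD "")
  -- counts[x] = counts.get(x, 0) + 1 over result
  let counts : PySem.Dict String Int := result.foldl (fun d x => d.insert x (d.getD x 0 + 1)) PySem.Dict.empty
  -- triple = next((x for x in result if counts[x] == 3), None)
  match result.find? (fun x => counts.getD x 0 == 3) with
  | some t => fruitAltTable.getD t 0 * 10
  | none =>
    let output := match result.find? (fun x => counts.getD x 0 == 2) with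
      | some p => fruitAltTable.getD p 0
      | none => 0
    let bonus : Int := if counts.getD "Wild" 0 == 1 then 2 else 1
    output * bonus

-- ===== PRECONDITION & SPEC =====
def fruitKeys : List String :=
  ["Wild", "Star", "Bell", "Shell", "Seven", "Cherry", "Bar", "King", "Queen", "Jack"]

-- Pre_fruit excludes the inputs where A raises (IndexError when spins is shorter than
-- reels or some reel[spins[i]] is out of range; KeyError when a symbol spun exactly 2 or
-- 3 times is looked up outside the scoring table).  Requiring table membership for EVERY
-- symbol spun 2 or 3 times is slightly narrower than A's raise set: when an in-table
-- triple precedes an unknown pair, A returns its score before reaching the bad lookup.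
def Pre_fruit (reels : List (List String)) (spins : List Int) : Prop :=
  reels.length ≤ spins.length ∧
  (∀ p ∈ reels.zip spins, (PySem.List.pyGet? p.1 p.2).isSome = true) ∧
  (∀ x ∈ (reels.zip spins).map (fun p => (PySem.List.pyGet? p.1 p.2).getD ""),
     (List.count x ((reels.zip spins).map (fun p => (PySem.List.pyGet? p.1 p.2).getD "")) = 2 ∨
      List.count x ((reels.zip spins).map (fun p => (PySem.List.pyGet? p.1 p.2).getD "")) = 3) →
     x ∈ fruitKeys)
instance (reels : List (List String)) (spins : List Int) : Decidable (Pre_fruit reels spins) := by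
  unfold Pre_fruit; infer_instance
def pvWitness_fruit : List (List String) × List Int :=
  ([["Bell", "Star"], ["Cherry"], ["Bell"]], [1, 0, -1])

def Spec_fruit (reels : List (List String)) (spins : List Int) (out : Int) : Prop := out = fruit_alt reels spins
instance (reels : List (List String)) (spins : List Int) (out : Int) : Decidable (Spec_fruit reels spins out) := by unfold Spec_fruit; infer_instance

-- ===== CLAIM (what is proved, stated in full; the proofs are below) =====
def Claim_equal_fruit : Prop := ∀ (reels : List (List String)) (spins : List Int), Dom_fruit reels spins → Pre_fruit reels spins → Spec_fruit reels spins (fruit reels spins)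

-- ===== LEMMAS AND PROOFS =====

-- two tables, one dictionary
theorem tables_eq : fruitAltTable = fruitTable := rfl

-- under Pre_ (reels not longer than spins, all indices valid) A's enumerate-indexed
-- comprehension and B's zip comprehension build the same symbol list
theorem result_eq (reels : List (List String)) (spins : List Int) (s : Nat)
    (hlen : reels.length + s ≤ spins.length) :
    (PySem.List.enumerate reels (s : Int)).map
      (fun p => (PySem.List.pyGet? p.2 (PySem.List.pyGetD spins p.1 0)).getD "") =
    (reels.zip (spins.drop s)).map (fun p => (PySem.List.pyGet? p.1 p.2).getD "") := by
  induction reels generalizing s with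
  | nil => simp [PySem.List.enumerate_nil]
  | cons r rest ih =>
    simp only [List.length_cons] at hlen
    have hdrop : spins.drop s = spins[s] :: spins.drop (s + 1) :=
      List.drop_eq_getElem_cons (by omega)
    have hidx : PySem.List.pyGetD spins (s : Int) 0 = spins[s] := by
      rw [PySem.List.pyGetD_eq_getElem spins 0 (by positivity) (by push_cast; omega)]
      simp
    rw [PySem.List.enumerate_cons, hdrop]
    simp only [List.zip_cons_cons, List.map_cons, hidx]
    have hc : ((s : Int) + 1) = ((s + 1 : Nat) : Int) := by omega
    rw [hc, ih (s + 1) (by omega)]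

-- characterisation of A's scan: the first count-3 symbol wins; otherwise the first
-- count-2 symbol (the counted flag) scores and Wild-spun-once doubles (the bonus flag)
theorem fruitLoop_char (res : List String) :
    ∀ (suf : List String) (counted : Bool) (output bonus : Int),
    fruitLoop res suf counted output bonus =
      match suf.find? (fun x => List.count x res == 3) with
      | some t => fruitTable.getD t 0 * 10
      | none =>
        (if counted then output
         else match suf.find? (fun x => List.count x res == 2) with
              | some p => fruitTable.getD p 0
              | none => output) *
        (if "Wild" ∈ suf ∧ List.count "Wild" res = 1 then 2 else bonus) := by
  intro suf
  induction suf with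
  | nil => intro counted output bonus; simp [fruitLoop]
  | cons x xs ih =>
    intro counted output bonus
    by_cases h3 : List.count x res = 3
    · simp [fruitLoop, h3]
    · rw [fruitLoop, if_neg h3, ih]
      by_cases h2 : List.count x res = 2 <;> by_cases hw : "Wild" = x <;>
        by_cases hcw : List.count "Wild" res = 1 <;> by_cases hm : ("Wild" : String) ∈ xs <;>
          cases counted <;>
            simp_all [List.find?_cons] <;> simp_all [eq_comm]

-- ===== VERDICT (by name: the statement is the Claim_ definition above) =====
theorem fruit_spec : Claim_equal_fruit := by
  intro reels spins _ hpre
  obtain ⟨hlen, hsome, -⟩ := hpre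
  show fruit _ _ = fruit_alt _ _
  unfold fruit fruit_alt
  have hres := result_eq reels spins 0 (by omega)
  simp only [Nat.cast_zero, List.drop_zero] at hres
  rw [hres, fruitLoop_char]
  have hb3 : ∀ n : Nat, ((n : Int) == (3 : Int)) = (n == 3) := by
    intro n; rw [Bool.eq_iff_iff]; simp; omega
  have hb2 : ∀ n : Nat, ((n : Int) == (2 : Int)) = (n == 2) := by
    intro n; rw [Bool.eq_iff_iff]; simp; omega
  dsimp only
  have hfold : List.foldl (fun d x => d.insert x (d.getD x 0 + 1)) PySem.Dict.empty
      ((reels.zip spins).map (fun p => (PySem.List.pyGet? p.1 p.2).getD "")) =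
      PySem.Dict.counter ((reels.zip spins).map (fun p => (PySem.List.pyGet? p.1 p.2).getD "")) :=
    PySem.Dict.foldl_insert_getD_add_one_eq_counter _
  have h3' : (fun x => (List.foldl (fun d x => d.insert x (d.getD x 0 + 1)) PySem.Dict.empty
      ((reels.zip spins).map (fun p => (PySem.List.pyGet? p.1 p.2).getD ""))).getD x 0 == (3 : Int)) =
      (fun x => List.count x ((reels.zip spins).map (fun p => (PySem.List.pyGet? p.1 p.2).getD "")) == 3) := by
    funext x; rw [hfold, PySem.Dict.getD_counter, hb3]
  have h2' : (fun x => (List.foldl (fun d x => d.insert x (d.getD x 0 + 1)) PySem.Dict.empty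
      ((reels.zip spins).map (fun p => (PySem.List.pyGet? p.1 p.2).getD ""))).getD x 0 == (2 : Int)) =
      (fun x => List.count x ((reels.zip spins).map (fun p => (PySem.List.pyGet? p.1 p.2).getD "")) == 2) := by
    funext x; rw [hfold, PySem.Dict.getD_counter, hb2]
  have hW' : (List.foldl (fun d x => d.insert x (d.getD x 0 + 1)) PySem.Dict.empty
      ((reels.zip spins).map (fun p => (PySem.List.pyGet? p.1 p.2).getD ""))).getD "Wild" 0 =
      ((List.count "Wild" ((reels.zip spins).map (fun p => (PySem.List.pyGet? p.1 p.2).getD "")) : Nat) : Int) := by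
    rw [hfold, PySem.Dict.getD_counter]
  rw [h3', h2', hW']
  by_cases hW : List.count "Wild" ((reels.zip spins).map (fun p => (PySem.List.pyGet? p.1 p.2).getD "")) = 1
  · have hmem : "Wild" ∈ (reels.zip spins).map (fun p => (PySem.List.pyGet? p.1 p.2).getD "") :=
      List.count_pos_iff.1 (by omega)
    simp [hW, hmem, tables_eq]
  · simp [hW, Nat.cast_eq_one, tables_eq]
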